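-- pv_equiv track=rewrite | github.com/alexandraback/datacollection | solutions_5648941810974720_0/Python/DanielCoder/code.py | solveCase
-- ===== SOURCE A (Python) =====
-- def solveCase(num):
--     num = list(num)
--     zeroes = num.count("Z")
--     for i in range(zeroes):
--         [num.remove(c) for c in "ZERO"]
--
--     fours = num.count("U")
--     for i in range(fours):
--         [num.remove(c) for c in "FOUR"]
--
--     twos = num.count("W")
--     for i in range(twos):
--         [num.remove(c) for c in "TWO"]
--
--     fives = num.count("F")
--     for i in range(fives):
--         [num.remove(c) for c in "FIVE"]
--
--     sixes = num.count("X")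
--     for i in range(sixes):
--         [num.remove(c) for c in "SIX"]
--
--     threes = num.count("R")
--     for i in range(threes):
--         [num.remove(c) for c in "THREE"]
--
--
--     ones = num.count("O")
--     for i in range(ones):
--         [num.remove(c) for c in "ONE"]
--
--     sevens = num.count("V")
--     for i in range(sevens):
--         [num.remove(c) for c in "SEVEN"]
--
--     eights = num.count("G")
--     for i in range(eights):
--         [num.remove(c) for c in "EIGHT"]
--
--     nines = num.count("I")
--     for i in range(nines):
--         [num.remove(c) for c in "NINE"]
--
--     return "0" * zeroes + "1" * ones + "2" * twos + "3" *  threes + "4" * fours + "5" * fives + "6" * sixes + "7" * sevens + "8" * eights + "9" * nines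
-- ===== SOURCE B (Python) =====
-- def solveCase(num):
--     cnt = {}
--     for ch in num:
--         cnt[ch] = cnt.get(ch, 0) + 1
--     g = cnt.get
--     zeroes = g("Z", 0)
--     fours = g("U", 0)
--     twos = g("W", 0)
--     sixes = g("X", 0)
--     eights = g("G", 0)
--     fives = g("F", 0) - fours
--     threes = g("R", 0) - zeroes - fours
--     ones = g("O", 0) - zeroes - fours - twos
--     sevens = g("V", 0) - fives
--     nines = g("I", 0) - fives - sixes - eights
--     counts = [zeroes, ones, twos, threes, fours, fives, sixes, sevens, eights, nines]
--     return "".join(str(d) * counts[d] for d in range(10))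
-- ===== Notes on version B (the rewrite author's own statement) =====
-- stated objective: faster
-- what changed: B replaces A's quadratic repeated list.remove scans (one linear scan per removed letter) with one counting pass building a letter-count dict and closed-form subtraction formulas for each digit count.
import Mathlib
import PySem

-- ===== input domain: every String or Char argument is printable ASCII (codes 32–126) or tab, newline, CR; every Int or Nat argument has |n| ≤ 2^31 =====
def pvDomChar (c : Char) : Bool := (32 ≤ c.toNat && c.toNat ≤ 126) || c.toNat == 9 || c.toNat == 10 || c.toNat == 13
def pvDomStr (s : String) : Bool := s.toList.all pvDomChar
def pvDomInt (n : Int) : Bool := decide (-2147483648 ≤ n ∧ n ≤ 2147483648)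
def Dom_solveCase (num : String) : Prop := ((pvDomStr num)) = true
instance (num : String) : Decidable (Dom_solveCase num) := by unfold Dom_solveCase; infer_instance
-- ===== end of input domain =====

-- B replaces A's repeated list.remove scans with one counting pass and closed-form
-- subtraction formulas per digit (objective: faster, measured asymptotic).

-- ===== PORT A =====
-- [num.remove(c) for c in word]: remove each letter of the word once, left to right;
-- none = the ValueError Python raises when a letter is missing.
def pvRemoveWord (xs : List Char) (w : List Char) : Option (List Char) :=
  match w with
  | [] => some xs
  | c :: rest =>
    match PySem.List.remove? xs c with
    | none => none
    | some ys => pvRemoveWord ys rest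

-- for i in range(n): [num.remove(c) for c in word]
def pvPhase (w : List Char) : Nat → List Char → Option (List Char)
  | 0, xs => some xs
  | Nat.succ n, xs =>
    match pvRemoveWord xs w with
    | none => none
    | some ys => pvPhase w n ys

def solveCase (num : String) : String :=
  let l0 := num.toList
  let zeroes := l0.count 'Z'
  match pvPhase ['Z','E','R','O'] zeroes l0 with
  | none => ""   -- Python raises ValueError here; excluded by Pre_solveCase
  | some l1 =>
  let fours := l1.count 'U'
  match pvPhase ['F','O','U','R'] fours l1 with
  | none => ""
  | some l2 =>
  let twos := l2.count 'W'
  match pvPhase ['T','W','O'] twos l2 with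
  | none => ""
  | some l3 =>
  let fives := l3.count 'F'
  match pvPhase ['F','I','V','E'] fives l3 with
  | none => ""
  | some l4 =>
  let sixes := l4.count 'X'
  match pvPhase ['S','I','X'] sixes l4 with
  | none => ""
  | some l5 =>
  let threes := l5.count 'R'
  match pvPhase ['T','H','R','E','E'] threes l5 with
  | none => ""
  | some l6 =>
  let ones := l6.count 'O'
  match pvPhase ['O','N','E'] ones l6 with
  | none => ""
  | some l7 =>
  let sevens := l7.count 'V'
  match pvPhase ['S','E','V','E','N'] sevens l7 with
  | none => ""
  | some l8 =>
  let eights := l8.count 'G'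
  match pvPhase ['E','I','G','H','T'] eights l8 with
  | none => ""
  | some l9 =>
  let nines := l9.count 'I'
  match pvPhase ['N','I','N','E'] nines l9 with
  | none => ""
  | some _ =>
  String.mk (List.replicate zeroes '0' ++ List.replicate ones '1' ++
    List.replicate twos '2' ++ List.replicate threes '3' ++ List.replicate fours '4' ++
    List.replicate fives '5' ++ List.replicate sixes '6' ++ List.replicate sevens '7' ++
    List.replicate eights '8' ++ List.replicate nines '9')

-- ===== PORT B =====
def solveCase_alt (num : String) : String :=
  let cnt : PySem.Dict Char Int :=
    num.toList.foldl (fun d ch => d.insert ch (d.getD ch 0 + 1)) PySem.Dict.empty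
  let zeroes := cnt.getD 'Z' 0
  let fours := cnt.getD 'U' 0
  let twos := cnt.getD 'W' 0
  let sixes := cnt.getD 'X' 0
  let eights := cnt.getD 'G' 0
  let fives := cnt.getD 'F' 0 - fours
  let threes := cnt.getD 'R' 0 - zeroes - fours
  let ones := cnt.getD 'O' 0 - zeroes - fours - twos
  let sevens := cnt.getD 'V' 0 - fives
  let nines := cnt.getD 'I' 0 - fives - sixes - eights
  let counts : List Int := [zeroes, ones, twos, threes, fours, fives, sixes, sevens, eights, nines]
  -- "".join(str(d) * counts[d] for d in range(10)); str*k is '' for k ≤ 0, as .toNat gives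
  String.mk (((PySem.List.pyRange 0 10 1).map
    (fun d => (List.replicate (PySem.List.pyGetD counts d 0).toNat (PySem.Int.toChars d)).flatten)).flatten)

-- ===== PRECONDITION & SPEC =====
-- Pre_ excludes exactly the inputs where A raises ValueError: some list.remove during its
-- fixed removal order (ZERO,FOUR,TWO,FIVE,SIX,THREE,ONE,SEVEN,EIGHT,NINE) finds no letter.
def Pre_solveCase (num : String) : Prop :=
  let l := num.toList
  let z := l.count 'Z'
  let u := l.count 'U'
  let w := l.count 'W'
  let x := l.count 'X'
  let g := l.count 'G'
  let f := l.count 'F' - u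
  let r := l.count 'R' - z - u
  let o := l.count 'O' - z - u - w
  let v := l.count 'V' - f
  let i := l.count 'I' - f - x - g
  u ≤ l.count 'F' ∧ z + u ≤ l.count 'R' ∧ z + u + w ≤ l.count 'O' ∧
  f ≤ l.count 'V' ∧ f + x + g ≤ l.count 'I' ∧
  z + f + 2 * r + o + 2 * v + g + i ≤ l.count 'E' ∧
  w + r + g ≤ l.count 'T' ∧ r + g ≤ l.count 'H' ∧
  x + v ≤ l.count 'S' ∧ o + v + 2 * i ≤ l.count 'N'
instance (num : String) : Decidable (Pre_solveCase num) := by unfold Pre_solveCase; infer_instance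
def pvWitness_solveCase : String := "ONE"

def Spec_solveCase (num : String) (out : String) : Prop := out = solveCase_alt num
instance (num : String) (out : String) : Decidable (Spec_solveCase num out) := by unfold Spec_solveCase; infer_instance

-- ===== CLAIM (what is proved, stated in full; the proofs are below) =====
def Claim_equal_solveCase : Prop := ∀ (num : String), Dom_solveCase num → Pre_solveCase num → Spec_solveCase num (solveCase num)

-- ===== LEMMAS AND PROOFS =====

lemma pvFlattenRep (n : Nat) (c : Char) : (List.replicate n [c]).flatten = List.replicate n c := by
  induction n with
  | zero => simp
  | succ k ih => simp [List.replicate_succ, ih]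

lemma pvRemoveWord_spec (w : List Char) : ∀ (xs : List Char),
    (∀ c ∈ w, w.count c ≤ xs.count c) →
    ∃ ys, pvRemoveWord xs w = some ys ∧ ∀ a, ys.count a = xs.count a - w.count a := by
  induction w with
  | nil => intro xs _; exact ⟨xs, rfl, by simp⟩
  | cons c rest ih =>
    intro xs h
    have hc : c ∈ xs := by
      have h1 := h c (List.mem_cons_self ..)
      have : 0 < xs.count c := by simp at h1; omega
      exact List.count_pos_iff.mp this
    obtain ⟨ys, hys, hcnt⟩ := ih (xs.erase c) (by
      intro c' hc'
      have h2 := h c' (List.mem_cons_of_mem _ hc')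
      rw [List.count_erase]
      by_cases he : c' = c
      · subst he; simp at h2 ⊢; omega
      · simp [List.count_cons, beq_iff_eq] at h2 ⊢; omega)
    refine ⟨ys, ?_, ?_⟩
    · simp [pvRemoveWord, PySem.List.remove?_eq_some_erase xs c hc, hys]
    · intro a
      have := hcnt a
      rw [List.count_erase] at this
      by_cases he : a = c
      · subst he; have h1 := h a (List.mem_cons_self ..)
        simp at h1 this ⊢; omega
      · simp [List.count_cons, beq_iff_eq] at this ⊢; omega

lemma pvPhase_spec (w : List Char) : ∀ (n : Nat) (xs : List Char),
    (∀ c ∈ w, n * w.count c ≤ xs.count c) →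
    ∃ ys, pvPhase w n xs = some ys ∧ ∀ a, ys.count a = xs.count a - n * w.count a := by
  intro n
  induction n with
  | zero => intro xs _; exact ⟨xs, rfl, by simp⟩
  | succ n ih =>
    intro xs h
    obtain ⟨ys, hys, hcnt⟩ := pvRemoveWord_spec w xs (by
      intro c hc
      have := h c hc
      have hmul : w.count c ≤ (n + 1) * w.count c := by nlinarith
      omega)
    obtain ⟨zs, hzs, hzcnt⟩ := ih ys (by
      intro c hc
      have h1 := h c hc
      have h2 := hcnt c
      have h3 : (n + 1) * w.count c = n * w.count c + w.count c := by ring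
      omega)
    refine ⟨zs, ?_, ?_⟩
    · simp [pvPhase, hys, hzs]
    · intro a
      have h2 := hcnt a
      have h3 := hzcnt a
      have h4 : (n + 1) * w.count a = n * w.count a + w.count a := by ring
      omega

-- ===== VERDICT (by name: the statement is the Claim_ definition above) =====
set_option maxHeartbeats 1600000 in
theorem solveCase_spec : Claim_equal_solveCase := by
  intro num _ hpre
  unfold Spec_solveCase
  simp only [Pre_solveCase] at hpre
  obtain ⟨p1, p2, p3, p4, p5, p6, p7, p8, p9, p10⟩ := hpre
  obtain ⟨l1, e1, c1⟩ := pvPhase_spec ['Z','E','R','O'] (num.toList.count 'Z') num.toList (by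
    intro c hc; fin_cases hc <;> simp <;> omega)
  have C1 : ∀ a, l1.count a = num.toList.count a - num.toList.count 'Z' * List.count a ['Z','E','R','O'] := c1
  have hN2 : l1.count 'U' = num.toList.count 'U' := by
    have := C1 'U'; simp at this; omega
  obtain ⟨l2, e2, c2⟩ := pvPhase_spec ['F','O','U','R'] (l1.count 'U') l1 (by
    intro c hc; rw [hN2]; fin_cases hc <;> rw [C1] <;> simp <;> omega)
  have C2 : ∀ a, l2.count a = num.toList.count a - num.toList.count 'Z' * List.count a ['Z','E','R','O'] - num.toList.count 'U' * List.count a ['F','O','U','R'] := by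
    intro a; rw [c2 a, hN2, C1 a]
  have hN3 : l2.count 'W' = num.toList.count 'W' := by
    have := C2 'W'; simp at this; omega
  obtain ⟨l3, e3, c3⟩ := pvPhase_spec ['T','W','O'] (l2.count 'W') l2 (by
    intro c hc; rw [hN3]; fin_cases hc <;> rw [C2] <;> simp <;> omega)
  have C3 : ∀ a, l3.count a = num.toList.count a - num.toList.count 'Z' * List.count a ['Z','E','R','O'] - num.toList.count 'U' * List.count a ['F','O','U','R'] - num.toList.count 'W' * List.count a ['T','W','O'] := by
    intro a; rw [c3 a, hN3, C2 a]
  have hN4 : l3.count 'F' = (num.toList.count 'F' - num.toList.count 'U') := by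
    have := C3 'F'; simp at this; omega
  obtain ⟨l4, e4, c4⟩ := pvPhase_spec ['F','I','V','E'] (l3.count 'F') l3 (by
    intro c hc; rw [hN4]; fin_cases hc <;> rw [C3] <;> simp <;> omega)
  have C4 : ∀ a, l4.count a = num.toList.count a - num.toList.count 'Z' * List.count a ['Z','E','R','O'] - num.toList.count 'U' * List.count a ['F','O','U','R'] - num.toList.count 'W' * List.count a ['T','W','O'] - (num.toList.count 'F' - num.toList.count 'U') * List.count a ['F','I','V','E'] := by
    intro a; rw [c4 a, hN4, C3 a]
  have hN5 : l4.count 'X' = num.toList.count 'X' := by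
    have := C4 'X'; simp at this; omega
  obtain ⟨l5, e5, c5⟩ := pvPhase_spec ['S','I','X'] (l4.count 'X') l4 (by
    intro c hc; rw [hN5]; fin_cases hc <;> rw [C4] <;> simp <;> omega)
  have C5 : ∀ a, l5.count a = num.toList.count a - num.toList.count 'Z' * List.count a ['Z','E','R','O'] - num.toList.count 'U' * List.count a ['F','O','U','R'] - num.toList.count 'W' * List.count a ['T','W','O'] - (num.toList.count 'F' - num.toList.count 'U') * List.count a ['F','I','V','E'] - num.toList.count 'X' * List.count a ['S','I','X'] := by
    intro a; rw [c5 a, hN5, C4 a]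
  have hN6 : l5.count 'R' = (num.toList.count 'R' - num.toList.count 'Z' - num.toList.count 'U') := by
    have := C5 'R'; simp at this; omega
  obtain ⟨l6, e6, c6⟩ := pvPhase_spec ['T','H','R','E','E'] (l5.count 'R') l5 (by
    intro c hc; rw [hN6]; fin_cases hc <;> rw [C5] <;> simp <;> omega)
  have C6 : ∀ a, l6.count a = num.toList.count a - num.toList.count 'Z' * List.count a ['Z','E','R','O'] - num.toList.count 'U' * List.count a ['F','O','U','R'] - num.toList.count 'W' * List.count a ['T','W','O'] - (num.toList.count 'F' - num.toList.count 'U') * List.count a ['F','I','V','E'] - num.toList.count 'X' * List.count a ['S','I','X'] - (num.toList.count 'R' - num.toList.count 'Z' - num.toList.count 'U') * List.count a ['T','H','R','E','E'] := by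
    intro a; rw [c6 a, hN6, C5 a]
  have hN7 : l6.count 'O' = (num.toList.count 'O' - num.toList.count 'Z' - num.toList.count 'U' - num.toList.count 'W') := by
    have := C6 'O'; simp at this; omega
  obtain ⟨l7, e7, c7⟩ := pvPhase_spec ['O','N','E'] (l6.count 'O') l6 (by
    intro c hc; rw [hN7]; fin_cases hc <;> rw [C6] <;> simp <;> omega)
  have C7 : ∀ a, l7.count a = num.toList.count a - num.toList.count 'Z' * List.count a ['Z','E','R','O'] - num.toList.count 'U' * List.count a ['F','O','U','R'] - num.toList.count 'W' * List.count a ['T','W','O'] - (num.toList.count 'F' - num.toList.count 'U') * List.count a ['F','I','V','E'] - num.toList.count 'X' * List.count a ['S','I','X'] - (num.toList.count 'R' - num.toList.count 'Z' - num.toList.count 'U') * List.count a ['T','H','R','E','E'] - (num.toList.count 'O' - num.toList.count 'Z' - num.toList.count 'U' - num.toList.count 'W') * List.count a ['O','N','E'] := by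
    intro a; rw [c7 a, hN7, C6 a]
  have hN8 : l7.count 'V' = (num.toList.count 'V' - (num.toList.count 'F' - num.toList.count 'U')) := by
    have := C7 'V'; simp at this; omega
  obtain ⟨l8, e8, c8⟩ := pvPhase_spec ['S','E','V','E','N'] (l7.count 'V') l7 (by
    intro c hc; rw [hN8]; fin_cases hc <;> rw [C7] <;> simp <;> omega)
  have C8 : ∀ a, l8.count a = num.toList.count a - num.toList.count 'Z' * List.count a ['Z','E','R','O'] - num.toList.count 'U' * List.count a ['F','O','U','R'] - num.toList.count 'W' * List.count a ['T','W','O'] - (num.toList.count 'F' - num.toList.count 'U') * List.count a ['F','I','V','E'] - num.toList.count 'X' * List.count a ['S','I','X'] - (num.toList.count 'R' - num.toList.count 'Z' - num.toList.count 'U') * List.count a ['T','H','R','E','E'] - (num.toList.count 'O' - num.toList.count 'Z' - num.toList.count 'U' - num.toList.count 'W') * List.count a ['O','N','E'] - (num.toList.count 'V' - (num.toList.count 'F' - num.toList.count 'U')) * List.count a ['S','E','V','E','N'] := by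
    intro a; rw [c8 a, hN8, C7 a]
  have hN9 : l8.count 'G' = num.toList.count 'G' := by
    have := C8 'G'; simp at this; omega
  obtain ⟨l9, e9, c9⟩ := pvPhase_spec ['E','I','G','H','T'] (l8.count 'G') l8 (by
    intro c hc; rw [hN9]; fin_cases hc <;> rw [C8] <;> simp <;> omega)
  have C9 : ∀ a, l9.count a = num.toList.count a - num.toList.count 'Z' * List.count a ['Z','E','R','O'] - num.toList.count 'U' * List.count a ['F','O','U','R'] - num.toList.count 'W' * List.count a ['T','W','O'] - (num.toList.count 'F' - num.toList.count 'U') * List.count a ['F','I','V','E'] - num.toList.count 'X' * List.count a ['S','I','X'] - (num.toList.count 'R' - num.toList.count 'Z' - num.toList.count 'U') * List.count a ['T','H','R','E','E'] - (num.toList.count 'O' - num.toList.count 'Z' - num.toList.count 'U' - num.toList.count 'W') * List.count a ['O','N','E'] - (num.toList.count 'V' - (num.toList.count 'F' - num.toList.count 'U')) * List.count a ['S','E','V','E','N'] - num.toList.count 'G' * List.count a ['E','I','G','H','T'] := by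
    intro a; rw [c9 a, hN9, C8 a]
  have hN10 : l9.count 'I' = (num.toList.count 'I' - (num.toList.count 'F' - num.toList.count 'U') - num.toList.count 'X' - num.toList.count 'G') := by
    have := C9 'I'; simp at this; omega
  obtain ⟨l10, e10, c10⟩ := pvPhase_spec ['N','I','N','E'] (l9.count 'I') l9 (by
    intro c hc; rw [hN10]; fin_cases hc <;> rw [C9] <;> simp <;> omega)
  simp only [solveCase, e1, e2, e3, e4, e5, e6, e7, e8, e9, e10]
  rw [hN2, hN3, hN4, hN5, hN6, hN7, hN8, hN9, hN10]
  have hR : PySem.List.pyRange 0 10 1 = [0,1,2,3,4,5,6,7,8,9] := by decide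
  simp only [solveCase_alt, hR, PySem.Dict.getD_foldl_insert_add_one, List.map_cons, List.map_nil]
  simp only [PySem.List.pyGetD_ofNat']
  have t0 : PySem.Int.toChars 0 = ['0'] := by decide
  have t1 : PySem.Int.toChars 1 = ['1'] := by decide
  have t2 : PySem.Int.toChars 2 = ['2'] := by decide
  have t3 : PySem.Int.toChars 3 = ['3'] := by decide
  have t4 : PySem.Int.toChars 4 = ['4'] := by decide
  have t5 : PySem.Int.toChars 5 = ['5'] := by decide
  have t6 : PySem.Int.toChars 6 = ['6'] := by decide
  have t7 : PySem.Int.toChars 7 = ['7'] := by decide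
  have t8 : PySem.Int.toChars 8 = ['8'] := by decide
  have t9 : PySem.Int.toChars 9 = ['9'] := by decide
  simp only [t0, t1, t2, t3, t4, t5, t6, t7, t8, t9, pvFlattenRep, List.flatten_cons,
    List.flatten_nil, List.append_nil]
  simp [PySem.Dict.getD_empty]
  have rV : ((List.count 'V' num.toList : Int) - ((List.count 'F' num.toList : Int) - (List.count 'U' num.toList : Int))).toNat
      = List.count 'V' num.toList - (List.count 'F' num.toList - List.count 'U' num.toList) := by omega
  have rI : ((List.count 'I' num.toList : Int) - ((List.count 'F' num.toList : Int) - (List.count 'U' num.toList : Int))).toNat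
      = List.count 'I' num.toList - (List.count 'F' num.toList - List.count 'U' num.toList) := by omega
  rw [rV, rI]
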